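-- pv_equiv track=rewrite | github.com/EnMaj/lect_25_10 | test_3.py | number_of_zeros_1
-- ===== SOURCE A (Python) =====
-- def number_of_zeros_1(n):
--     quantitly = 0
--     while abs(n)>0:
--         if quantitly >= 3:
--             return True
--         elif n % 10 == 0:
--             quantitly+=1
--         n=abs(n)//10
--     return False
-- ===== SOURCE B (Python) =====
-- def number_of_zeros_1(n):
--     return str(abs(n)).count("0") >= 3
-- ===== Notes on version B (the rewrite author's own statement) =====
-- stated objective: idiomatic
-- what changed: Replaces the manual modular digit-extraction loop with early exit by a single expression that counts '0' characters in the decimal string of abs(n).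
import Mathlib
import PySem

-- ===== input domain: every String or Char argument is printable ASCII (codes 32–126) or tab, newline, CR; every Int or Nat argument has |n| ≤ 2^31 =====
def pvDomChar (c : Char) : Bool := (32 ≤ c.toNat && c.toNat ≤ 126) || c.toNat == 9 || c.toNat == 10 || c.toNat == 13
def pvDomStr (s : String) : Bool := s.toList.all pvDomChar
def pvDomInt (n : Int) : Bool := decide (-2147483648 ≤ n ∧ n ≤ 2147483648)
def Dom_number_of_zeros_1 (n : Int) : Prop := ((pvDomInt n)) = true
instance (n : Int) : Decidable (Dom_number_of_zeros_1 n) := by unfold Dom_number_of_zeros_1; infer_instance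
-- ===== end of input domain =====

-- B replaces A's modular digit-extraction loop by counting '0' characters in str(abs(n)) (idiomatic, same cost).

-- ===== PORT A =====
-- the while loop of A: state (n, quantitly); each iteration checks quantitly >= 3,
-- increments on n % 10 == 0, then sets n = abs(n) // 10
def numZerosLoop (n q : Int) : Bool :=
  if 0 < |n| then
    if q ≥ 3 then true
    else numZerosLoop (PySem.Int.floordiv |n| 10)
           (if PySem.Int.mod n 10 = 0 then q + 1 else q)
  else false
termination_by |n|.toNat
decreasing_by
  simp only [PySem.Int.floordiv]
  have h1 : |n|.fdiv 10 = |n| / 10 := by rw [Int.fdiv_eq_ediv]; simp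
  rw [h1, abs_of_nonneg (by positivity : (0:Int) ≤ |n| / 10)]
  omega

def number_of_zeros_1 (n : Int) : Bool := numZerosLoop n 0

-- ===== PORT B =====
def number_of_zeros_1_alt (n : Int) : Bool :=
  decide (3 ≤ PySem.Str.count (PySem.Int.toStr |n|) "0")

-- ===== PRECONDITION & SPEC =====
def Spec_number_of_zeros_1 (n : Int) (out : Bool) : Prop := out = number_of_zeros_1_alt n
instance (n : Int) (out : Bool) : Decidable (Spec_number_of_zeros_1 n out) := by unfold Spec_number_of_zeros_1; infer_instance

-- ===== CLAIM (what is proved, stated in full; the proofs are below) =====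
def Claim_equal_number_of_zeros_1 : Prop := ∀ (n : Int), Dom_number_of_zeros_1 n → Spec_number_of_zeros_1 n (number_of_zeros_1 n)

-- ===== LEMMAS AND PROOFS =====

-- number of zero digits of a natural number, 0 for 0 (the quantity A's loop accumulates)
def zDigits (m : Nat) : Nat :=
  if m = 0 then 0
  else (if m % 10 = 0 then 1 else 0) + zDigits (m / 10)
decreasing_by omega

theorem numZerosLoop_eq (k : Nat) : ∀ (n q : Int), n.natAbs = k → q < 3 →
    numZerosLoop n q = decide (3 ≤ q + (zDigits n.natAbs : Int)) := by
  induction k using Nat.strong_induction_on with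
  | _ k ih =>
    intro n q hk hq
    rw [numZerosLoop]
    by_cases h0 : 0 < |n|
    · have hn0 : n.natAbs ≠ 0 := by
        simp only [Int.abs_eq_natAbs] at h0; omega
      rw [if_pos h0, if_neg (by omega)]
      have hdvd : PySem.Int.mod n 10 = 0 ↔ n.natAbs % 10 = 0 := by
        simp only [PySem.Int.mod]
        constructor
        · intro h
          have : (10:Int) ∣ n := Int.dvd_of_fmod_eq_zero h
          have : (10:Nat) ∣ n.natAbs := by
            rwa [Int.natCast_dvd_natCast.symm, Int.dvd_natAbs]
          omega
        · intro h
          apply Int.fmod_eq_zero_of_dvd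
          rw [← Int.dvd_natAbs]
          exact_mod_cast Nat.dvd_of_mod_eq_zero h
      have hfd : (PySem.Int.floordiv |n| 10).natAbs = n.natAbs / 10 := by
        simp only [PySem.Int.floordiv]
        have h1 : |n|.fdiv 10 = |n| / 10 := by rw [Int.fdiv_eq_ediv]; simp
        rw [h1, Int.abs_eq_natAbs]
        omega
      have hlt : n.natAbs / 10 < k := by omega
      have hz : zDigits n.natAbs
          = (if n.natAbs % 10 = 0 then 1 else 0) + zDigits (n.natAbs / 10) := by
        rw [zDigits, if_neg hn0]
      by_cases hm : PySem.Int.mod n 10 = 0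
      · rw [if_pos hm]
        have hm' : n.natAbs % 10 = 0 := hdvd.mp hm
        by_cases hq2 : q + 1 < 3
        · rw [ih _ hlt _ _ hfd hq2, hz, if_pos hm', hfd]
          simp only [decide_eq_decide]
          push_cast
          omega
        · -- q + 1 = 3: one more zero reaches the threshold; the remaining n is still positive
          have hq3 : q = 2 := by omega
          have hge10 : 10 ≤ n.natAbs := by
            rcases Nat.lt_or_ge n.natAbs 10 with h | h
            · interval_cases hna : n.natAbs <;> omega
            · exact h
          rw [numZerosLoop]
          have hpos : 0 < |PySem.Int.floordiv |n| 10| := by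
            rw [Int.abs_eq_natAbs, hfd]
            have := hge10
            omega
          rw [if_pos hpos, if_pos (by omega)]
          rw [hz, if_pos hm', hq3]
          symm
          simp only [decide_eq_true_eq]
          push_cast
          omega
      · rw [if_neg hm]
        have hm' : ¬ n.natAbs % 10 = 0 := fun h => hm (hdvd.mpr h)
        rw [ih _ hlt _ _ hfd hq, hz, if_neg hm', hfd]
        simp only [decide_eq_decide]
        push_cast
        omega
    · rw [if_neg h0]
      have : n.natAbs = 0 := by
        simp only [Int.abs_eq_natAbs] at h0; omega
      rw [this]
      have hz0 : zDigits 0 = 0 := by rw [zDigits]; simp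
      rw [hz0]
      symm
      simp only [decide_eq_false_iff_not]
      omega

-- counting a single character with Python's str.count scanner equals List.count
theorem chars_count_go_single (c : Char) : ∀ (l : List Char) (f acc : Nat),
    l.length ≤ f → PySem.Chars.count.go [c] f l acc = acc + l.count c := by
  intro l
  induction l with
  | nil =>
    intro f acc _
    cases f <;> simp [PySem.Chars.count.go]
  | cons h t ih =>
    intro f acc hf
    cases f with
    | zero => simp at hf
    | succ f =>
      rw [PySem.Chars.count.go]
      by_cases hc : h = c
      · have hpre : [c].isPrefixOf (h :: t) = true := by
          simp [List.isPrefixOf, hc]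
        rw [if_pos hpre]
        simp only [List.length_singleton, List.drop_one, List.tail_cons]
        rw [ih f (acc + 1) (by simpa using hf)]
        simp [hc]
        omega
      · have hpre : [c].isPrefixOf (h :: t) = false := by
          simp [List.isPrefixOf]
          exact fun h' => (hc h'.symm).elim
        rw [if_neg (by simp [hpre])]
        rw [ih f acc (by simpa using hf)]
        simp [hc]

theorem chars_count_single (c : Char) (l : List Char) :
    PySem.Chars.count l [c] = l.count c := by
  rw [PySem.Chars.count]
  simp only [List.isEmpty_cons, if_false, Bool.false_eq_true]
  rw [chars_count_go_single c l l.length 0 le_rfl]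
  omega

-- digitChar of a digit is '0' exactly for 0
theorem digitChar_eq_zero_iff (k : Nat) (hk : k < 10) :
    (Nat.digitChar k = '0') ↔ k = 0 := by
  interval_cases k <;> simp [Nat.digitChar]

-- the decimal characters produced by Nat.toDigitsCore, fuel-independently
def natRep (m : Nat) : List Char :=
  if m / 10 = 0 then [Nat.digitChar m]
  else natRep (m / 10) ++ [Nat.digitChar (m % 10)]
decreasing_by
  have : 10 ≤ m := by omega
  omega

theorem toDigitsCore_eq_natRep : ∀ (f m : Nat) (l : List Char), m < f →
    Nat.toDigitsCore 10 f m l = natRep m ++ l := by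
  intro f
  induction f with
  | zero => intro m l h; omega
  | succ f ih =>
    intro m l h
    rw [Nat.toDigitsCore, natRep]
    by_cases h10 : m / 10 = 0
    · simp [h10, Nat.mod_eq_of_lt (show m < 10 by omega)]
    · rw [if_neg h10, if_neg h10]
      rw [ih (m / 10) _ (by omega)]
      simp

theorem natRep_count_zero (m : Nat) :
    (natRep m).count '0' = if m = 0 then 1 else zDigits m := by
  induction m using Nat.strong_induction_on with
  | _ m ih =>
    rw [natRep]
    by_cases h10 : m / 10 = 0
    · rw [if_pos h10]
      have hm : m < 10 := by omega
      by_cases hm0 : m = 0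
      · simp [hm0, Nat.digitChar]
      · rw [if_neg hm0]
        rw [zDigits, if_neg hm0, zDigits]
        rw [if_pos h10]
        have : ¬ m % 10 = 0 := by omega
        rw [if_neg this]
        simp only [List.count_singleton]
        have := digitChar_eq_zero_iff m hm
        simp only [beq_iff_eq]
        rw [if_neg (fun h => hm0 (this.mp h))]
    · rw [if_neg h10]
      rw [List.count_append]
      have hlt : m / 10 < m := by omega
      rw [ih (m / 10) hlt, if_neg h10]
      have hm0 : ¬ m = 0 := by omega
      rw [if_neg hm0]
      conv_rhs => rw [zDigits, if_neg hm0]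
      simp only [List.count_singleton, beq_iff_eq]
      have := digitChar_eq_zero_iff (m % 10) (by omega)
      by_cases hz : m % 10 = 0
      · rw [if_pos hz, if_pos (this.mpr hz)]; omega
      · rw [if_neg hz, if_neg (fun h => hz (this.mp h))]; omega

theorem alt_count (n : Int) :
    PySem.Str.count (PySem.Int.toStr |n|) "0"
      = if n.natAbs = 0 then 1 else zDigits n.natAbs := by
  rw [PySem.Str.count, PySem.Int.toList_toStr]
  have habs : ¬ |n| < 0 := not_lt.mpr (abs_nonneg n)
  have h1 : PySem.Int.toChars |n| = Nat.toDigits 10 n.natAbs := by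
    simp only [PySem.Int.toChars, if_neg habs]
    congr 1
    rw [Int.abs_eq_natAbs, Int.toNat_natCast]
  rw [h1]
  have h2 : ("0" : String).toList = ['0'] := rfl
  rw [h2, chars_count_single]
  rw [Nat.toDigits, toDigitsCore_eq_natRep _ _ _ (by omega)]
  rw [List.append_nil, natRep_count_zero]

-- ===== VERDICT (by name: the statement is the Claim_ definition above) =====
theorem number_of_zeros_1_spec : Claim_equal_number_of_zeros_1 := by
  intro n _
  unfold Spec_number_of_zeros_1 number_of_zeros_1 number_of_zeros_1_alt
  rw [numZerosLoop_eq n.natAbs n 0 rfl (by omega), alt_count]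
  by_cases h : n.natAbs = 0
  · rw [if_pos h, h]
    simp [zDigits]
  · rw [if_neg h]
    simp only [decide_eq_decide]
    omega
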